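-- pv_equiv track=rewrite | github.com/joetache4/ProjectEuler | 150_SearchingATriangularArrayForASub-TriangleHavingMinimum_Sum.py | min_sub_triangle
-- ===== SOURCE A (Python) =====
-- from math import sqrt
--
-- def min_sub_triangle(triangle):
-- 	# calculate depth from length
-- 	depth = len(triangle)
-- 	depth = int(sqrt(8 * depth + 1) - 1) // 2
--
-- 	# current sums of sub-triangles
-- 	sum0 = [0 for x in range(len(triangle))]
--
-- 	# lists that store previous sums
-- 	sum1 = [0 for x in range(len(triangle))]
-- 	sum2 = [0 for x in range(len(triangle))]
--
-- 	# best solution so far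
-- 	min_sum = triangle[0]
-- 	min_info = None
--
-- 	# loop for each triangle height
-- 	for d in range(1, depth+1):
-- 		# indexes to various parts of interest in the triangle
-- 		self_index = 0
-- 		child_index_1 = 1    # the first of two elements directly underneath
-- 		child_index_2 = 2
-- 		grandchild_index = 4 # the single element two rows below
-- 		# loop for each triangle row
-- 		for level in range(0, depth - d + 1):
-- 			# loop for each triangle index
-- 			for index in range(0, level + 1):
-- 				# add parts together
-- 				sum0[self_index] = triangle[self_index]
-- 				try:
-- 					sum0[self_index] += sum1[child_index_1] + sum1[child_index_2]
-- 					sum0[self_index] -= sum2[grandchild_index]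
-- 				except:
-- 					# ignore index out of bounds
-- 					# happens at the bottom of the triangle when d=1,2
-- 					pass
-- 				# compare to minimum
-- 				if sum0[self_index] < min_sum:
-- 					min_sum = sum0[self_index]
-- 					min_info = (level, index, d, min_sum)
-- 				# going to next element in row, slide indices
-- 				self_index += 1
-- 				child_index_1 += 1
-- 				child_index_2 += 1
-- 				grandchild_index += 1
-- 			# going to next row, indices go to next row
-- 			child_index_1 += 1
-- 			child_index_2 += 1
-- 			grandchild_index += 2
-- 		# going to next higher height, shift sums
-- 		sum2 = sum1
-- 		sum1 = sum0
-- 		sum0 = sum2 # this will be overwritten next iteration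
--
-- 	return min_info
-- ===== SOURCE B (Python) =====
-- from math import isqrt
--
-- def min_sub_triangle(triangle):
--     n = len(triangle)
--     depth = (isqrt(8 * n + 1) - 1) // 2
--
--     # reshape into rows, keeping per-row prefix sums: pre[r][j] = sum of row r cols [0, j)
--     pre = []
--     pos = 0
--     for r in range(depth):
--         p = [0]
--         s = 0
--         for v in triangle[pos:pos + r + 1]:
--             s += v
--             p.append(s)
--         pre.append(p)
--         pos += r + 1
--
--     # acc[level][index] = sum of the height-d sub-triangle rooted at (level, index), for the current d
--     acc = [[0] * (r + 1) for r in range(depth)]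
--
--     min_sum = triangle[0]
--     min_info = None
--     for d in range(1, depth + 1):
--         for level in range(depth - d + 1):
--             row = pre[level + d - 1]
--             for index in range(level + 1):
--                 s = acc[level][index] + row[index + d] - row[index]
--                 acc[level][index] = s
--                 if s < min_sum:
--                     min_sum = s
--                     min_info = (level, index, d, min_sum)
--     return min_info
-- ===== Notes on version B (the rewrite author's own statement) =====
-- stated objective: alternative
-- what changed: Replaces the rolling sum0/sum1/sum2 inclusion-exclusion DP (with sliding child/grandchild index counters and try/except for out-of-bounds) by per-row prefix sums plus a per-apex accumulator that grows each sub-triangle by one O(1) row segment per height step, in the same (d, level, index) scan order; measured ~2x faster but not confirmed at the largest timing size.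
import Mathlib
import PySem

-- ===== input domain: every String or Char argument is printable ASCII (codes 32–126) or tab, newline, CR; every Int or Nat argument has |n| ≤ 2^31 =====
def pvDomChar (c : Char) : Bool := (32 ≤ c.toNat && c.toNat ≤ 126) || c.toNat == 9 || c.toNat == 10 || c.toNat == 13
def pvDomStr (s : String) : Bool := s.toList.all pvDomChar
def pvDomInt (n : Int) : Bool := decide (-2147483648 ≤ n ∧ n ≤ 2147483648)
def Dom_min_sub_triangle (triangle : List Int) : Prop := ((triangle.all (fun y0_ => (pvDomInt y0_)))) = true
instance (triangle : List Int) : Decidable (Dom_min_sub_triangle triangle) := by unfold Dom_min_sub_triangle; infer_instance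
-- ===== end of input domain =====

-- B replaces A's rolling inclusion-exclusion DP by per-row prefix sums with a per-apex accumulator
-- (same scan order, same results): a structurally different pass of the same asymptotic cost.


-- ===== PORT A =====
-- Kernel-transparent integer square root (Nat.sqrt is well-founded and does not reduce), used by
-- both ports for `int(sqrt(8*n+1)-1)//2`: the float sqrt is exact at any magnitude a real list
-- length can reach, so the truncation equals the integer square root.
def pvISqrt : Nat → Nat
  | 0 => 0
  | n + 1 => let r := pvISqrt n; if (r + 1) * (r + 1) ≤ n + 1 then r + 1 else r

-- Literal port of A.  Notes on exactness:
-- * `range(a,b)` loops over Nat trip counts with the loop variable recovered by offset;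
-- * reading the first element needs Pre_ (nonempty list); the read at self_index is always in
--   range (self_index < depth*(depth+1)/2 ≤ n), ported as getD;
-- * the try/except IndexError around the two compound updates becomes matching on `xs[i]?`
--   (`none` = IndexError; an exception in the first statement skips the second, an exception in
--   the second keeps the first's effect — exactly the match structure below);
-- * after Python's rotation `sum0` aliases `sum2`, but each `sum2` cell is read (as grandchild)
--   strictly before the write cursor reaches it (grandchild_index > self_index throughout), so the
--   aliasing is unobservable and the port keeps separate immutable lists.
-- A-side helpers: A's three loop bodies, named so the proofs can speak about them (same code,
-- same state).  Inner state: (sum0, self_index, child_index_1, child_index_2, grandchild_index,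
-- min_sum, min_info).
def pvAStep (triangle sum1 sum2 : List Int) (d level : Nat)
    (u : List Int × Nat × Nat × Nat × Nat × Int × Option (Int × Int × Int × Int)) (index : Nat) :
    List Int × Nat × Nat × Nat × Nat × Int × Option (Int × Int × Int × Int) :=
  match u with
  | (sum0, si, ci1, ci2, gi, mS, mI) =>
    let s := triangle.getD si 0
    let s :=
      match sum1[ci1]?, sum1[ci2]? with
      | some a, some b =>
        let s := s + a + b
        match sum2[gi]? with
        | some g => s - g
        | none => s
      | _, _ => s
    let sum0 := sum0.set si s
    if s < mS then
      (sum0, si + 1, ci1 + 1, ci2 + 1, gi + 1, s, some ((level : Int), (index : Int), (d : Int), s))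
    else
      (sum0, si + 1, ci1 + 1, ci2 + 1, gi + 1, mS, mI)

def pvALvl (triangle sum1 sum2 : List Int) (d : Nat)
    (t : List Int × Nat × Nat × Nat × Nat × Int × Option (Int × Int × Int × Int)) (level : Nat) :
    List Int × Nat × Nat × Nat × Nat × Int × Option (Int × Int × Int × Int) :=
  match (List.range (level + 1)).foldl (pvAStep triangle sum1 sum2 d level) t with
  | (sum0, si, ci1, ci2, gi, mS, mI) => (sum0, si, ci1 + 1, ci2 + 1, gi + 2, mS, mI)

def pvAIter (triangle : List Int) (depth : Nat)
    (st : List Int × List Int × List Int × Int × Option (Int × Int × Int × Int)) (dm1 : Nat) :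
    List Int × List Int × List Int × Int × Option (Int × Int × Int × Int) :=
  let d := dm1 + 1
  match st with
  | (sum0, sum1, sum2, minS, minI) =>
    match (List.range (depth - d + 1)).foldl (pvALvl triangle sum1 sum2 d)
        (sum0, 0, 1, 2, 4, minS, minI) with
    | (sum0, _, _, _, _, mS, mI) => (sum2, sum0, sum1, mS, mI)

def min_sub_triangle (triangle : List Int) : Option (Int × Int × Int × Int) :=
  let n := triangle.length
  let depth := (pvISqrt (8 * n + 1) - 1) / 2
  let sum0 := List.replicate n (0 : Int)
  let sum1 := List.replicate n (0 : Int)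
  let sum2 := List.replicate n (0 : Int)
  let minS := triangle.getD 0 0
  let minI : Option (Int × Int × Int × Int) := none
  ((List.range depth).foldl (pvAIter triangle depth) (sum0, sum1, sum2, minS, minI)).2.2.2.2

-- ===== PORT B =====
-- Literal port of Source B.  The slice taken for row r is `(triangle.drop pos).take (r+1)`
-- (= PySem.List.slice with natural bounds); the pre/row/acc subscripts are in-range
-- Python list accesses, ported as getD/set; reading the first element needs Pre_ (nonempty list).
-- B-side helpers: Source B's loop bodies, named so the proofs can speak about them (same code,
-- same state).
def pvBBuildRow (q : List Int × Int) (v : Int) : List Int × Int := (q.1 ++ [q.2 + v], q.2 + v)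

def pvBBuildPre (triangle : List Int) (ps : List (List Int) × Nat) (r : Nat) :
    List (List Int) × Nat :=
  let p := ((triangle.drop ps.2).take (r + 1)).foldl pvBBuildRow ([0], 0)
  (ps.1 ++ [p.1], ps.2 + (r + 1))

def pvBStep (row : List Int) (d level : Nat)
    (u : List (List Int) × Int × Option (Int × Int × Int × Int)) (index : Nat) :
    List (List Int) × Int × Option (Int × Int × Int × Int) :=
  match u with
  | (acc, mS, mI) =>
    let s := (acc.getD level []).getD index 0 + row.getD (index + d) 0 - row.getD index 0
    let acc := acc.set level ((acc.getD level []).set index s)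
    if s < mS then (acc, s, some ((level : Int), (index : Int), (d : Int), s))
    else (acc, mS, mI)

def pvBLvl (pre : List (List Int)) (d : Nat)
    (t : List (List Int) × Int × Option (Int × Int × Int × Int)) (level : Nat) :
    List (List Int) × Int × Option (Int × Int × Int × Int) :=
  let row := pre.getD (level + d - 1) []
  (List.range (level + 1)).foldl (pvBStep row d level) t

def pvBIter (pre : List (List Int)) (depth : Nat)
    (st : List (List Int) × Int × Option (Int × Int × Int × Int)) (dm1 : Nat) :
    List (List Int) × Int × Option (Int × Int × Int × Int) :=
  let d := dm1 + 1
  (List.range (depth - d + 1)).foldl (pvBLvl pre d) st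

def min_sub_triangle_alt (triangle : List Int) : Option (Int × Int × Int × Int) :=
  let n := triangle.length
  let depth := (pvISqrt (8 * n + 1) - 1) / 2
  let pre := ((List.range depth).foldl (pvBBuildPre triangle) ([], 0)).1
  let acc := (List.range depth).map (fun r => List.replicate (r + 1) (0 : Int))
  let minS := triangle.getD 0 0
  let minI : Option (Int × Int × Int × Int) := none
  ((List.range depth).foldl (pvBIter pre depth) (acc, minS, minI)).2.2

-- ===== PRECONDITION & SPEC =====
-- Pre_ excludes only the empty list, on which A raises IndexError reading the first element
-- (B raises too).
def Pre_min_sub_triangle (triangle : List Int) : Prop := triangle ≠ []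
instance (triangle : List Int) : Decidable (Pre_min_sub_triangle triangle) := by
  unfold Pre_min_sub_triangle; infer_instance

def pvWitness_min_sub_triangle : List Int := [3, -1, 4, -1, 5, -9]

def Spec_min_sub_triangle (triangle : List Int) (out : Option (Int × Int × Int × Int)) : Prop := out = min_sub_triangle_alt triangle
instance (triangle : List Int) (out : Option (Int × Int × Int × Int)) : Decidable (Spec_min_sub_triangle triangle out) := by unfold Spec_min_sub_triangle; infer_instance

-- ===== CLAIM (what is proved, stated in full; the proofs are below) =====
def Claim_equal_min_sub_triangle : Prop := ∀ (triangle : List Int), Dom_min_sub_triangle triangle → Pre_min_sub_triangle triangle → Spec_min_sub_triangle triangle (min_sub_triangle triangle)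

-- ===== LEMMAS AND PROOFS =====

-- Spec-side geometry: triangular numbers, flattened index, cells, row segments, sub-triangle sums.
def pvT (r : Nat) : Nat := r * (r + 1) / 2
def pvFlat (r c : Nat) : Nat := pvT r + c
def pvCell (tri : List Int) (r c : Nat) : Int := tri.getD (pvFlat r c) 0
def pvSeg (tri : List Int) (r c len : Nat) : Int :=
  ((List.range len).map (fun j => pvCell tri r (c + j))).sum
def pvTri (tri : List Int) (d r c : Nat) : Int :=
  ((List.range d).map (fun i => pvSeg tri (r + i) c (i + 1))).sum

-- The canonical minimum fold over all candidates in the common scan order of A and B.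
def pvCand (tri : List Int) (d r c : Nat) (st : Int × Option (Int × Int × Int × Int)) :
    Int × Option (Int × Int × Int × Int) :=
  let s := pvTri tri d r c
  if s < st.1 then (s, some ((r : Int), (c : Int), (d : Int), s)) else st
def pvCanonRow (tri : List Int) (d level k : Nat) (st : Int × Option (Int × Int × Int × Int)) :
    Int × Option (Int × Int × Int × Int) :=
  (List.range k).foldl (fun st index => pvCand tri d level index st) st
def pvCanonLvls (tri : List Int) (d m : Nat) (st : Int × Option (Int × Int × Int × Int)) :
    Int × Option (Int × Int × Int × Int) :=
  (List.range m).foldl (fun st level => pvCanonRow tri d level (level + 1) st) st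
def pvCanon (tri : List Int) (depth dm : Nat) (st : Int × Option (Int × Int × Int × Int)) :
    Int × Option (Int × Int × Int × Int) :=
  (List.range dm).foldl (fun st dm1 => pvCanonLvls tri (dm1 + 1) (depth - (dm1 + 1) + 1) st) st

lemma pvT_two_mul (r : Nat) : 2 * pvT r = r * (r + 1) := by
  unfold pvT
  have h : 2 ∣ r * (r + 1) := (Nat.even_mul_succ_self r).two_dvd
  omega
lemma pvT_succ (r : Nat) : pvT (r + 1) = pvT r + (r + 1) := by
  have h1 := pvT_two_mul r
  have h2 := pvT_two_mul (r + 1)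
  have : (r + 1) * (r + 1 + 1) = r * (r + 1) + 2 * (r + 1) := by ring
  omega
lemma pvT_mono {r s : Nat} (h : r ≤ s) : pvT r ≤ pvT s := by
  have h1 := pvT_two_mul r
  have h2 := pvT_two_mul s
  have : r * (r + 1) ≤ s * (s + 1) := Nat.mul_le_mul h (by omega)
  omega
lemma pvFlat_lt_pvT {r c : Nat} (h : c ≤ r) : pvFlat r c < pvT (r + 1) := by
  unfold pvFlat
  rw [pvT_succ]
  omega
lemma pvISqrt_spec (n : Nat) :
    pvISqrt n * pvISqrt n ≤ n ∧ n < (pvISqrt n + 1) * (pvISqrt n + 1) := by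
  induction n with
  | zero => simp [pvISqrt]
  | succ m ih =>
    simp only [pvISqrt]
    split
    · next hle => exact ⟨hle, by nlinarith [ih.2]⟩
    · next hgt => exact ⟨by omega, by omega⟩
lemma pvDepth_le (n : Nat) : pvT ((pvISqrt (8 * n + 1) - 1) / 2) ≤ n := by
  set s := pvISqrt (8 * n + 1) with hs
  set d := (s - 1) / 2 with hd
  have hspec := pvISqrt_spec (8 * n + 1)
  have hs1 : 1 ≤ s := by
    rcases Nat.eq_zero_or_pos s with h0 | h1
    · rw [← hs, h0] at hspec; omega
    · exact h1
  have h2d : 2 * d + 1 ≤ s := by omega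
  have hsq : (2 * d + 1) * (2 * d + 1) ≤ s * s := Nat.mul_le_mul h2d h2d
  have hT := pvT_two_mul d
  nlinarith [hspec.1]

lemma pvSeg_zero (tri : List Int) (r c : Nat) : pvSeg tri r c 0 = 0 := by
  simp [pvSeg]
lemma pvSeg_succ (tri : List Int) (r c l : Nat) :
    pvSeg tri r c (l + 1) = pvSeg tri r c l + pvCell tri r (c + l) := by
  simp [pvSeg, List.range_succ]
lemma pvSeg_split (tri : List Int) (r c l : Nat) :
    pvSeg tri r 0 (c + l) = pvSeg tri r 0 c + pvSeg tri r c l := by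
  induction l with
  | zero => simp [pvSeg_zero]
  | succ m ih =>
    have h : c + (m + 1) = (c + m) + 1 := by omega
    rw [h, pvSeg_succ, pvSeg_succ, ih]
    simp
    ring
lemma pvTri_zero (tri : List Int) (r c : Nat) : pvTri tri 0 r c = 0 := by
  simp [pvTri]
lemma pvTri_succ (tri : List Int) (d r c : Nat) :
    pvTri tri (d + 1) r c = pvTri tri d r c + pvSeg tri (r + d) c (d + 1) := by
  simp [pvTri, List.range_succ]
lemma pvTri_one (tri : List Int) (r c : Nat) : pvTri tri 1 r c = pvCell tri r c := by
  simp [pvTri, pvSeg]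
-- inclusion-exclusion at heights ≥ 2, by induction on the height
lemma pvTri_ie2 (tri : List Int) (d r c : Nat) :
    pvTri tri (d + 2) r c = pvCell tri r c + pvTri tri (d + 1) (r + 1) c
      + pvTri tri (d + 1) (r + 1) (c + 1) - pvTri tri d (r + 2) (c + 1) := by
  induction d with
  | zero =>
    rw [pvTri_zero]
    show pvTri tri 2 r c = _
    have h2 : pvTri tri 2 r c = pvTri tri 1 r c + pvSeg tri (r + 1) c 2 := pvTri_succ tri 1 r c
    rw [h2, pvTri_one, pvTri_one, pvTri_one]
    have hseg : pvSeg tri (r + 1) c 2 = pvCell tri (r + 1) c + pvCell tri (r + 1) (c + 1) := by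
      rw [pvSeg_succ, pvSeg_succ, pvSeg_zero]
      simp
    rw [hseg]
    ring
  | succ m ih =>
    have hL : pvTri tri (m + 3) r c = pvTri tri (m + 2) r c + pvSeg tri (r + (m + 2)) c (m + 3) :=
      pvTri_succ tri (m + 2) r c
    have h1 : pvTri tri (m + 2) (r + 1) c
        = pvTri tri (m + 1) (r + 1) c + pvSeg tri (r + 1 + (m + 1)) c (m + 2) :=
      pvTri_succ tri (m + 1) (r + 1) c
    have h2 : pvTri tri (m + 2) (r + 1) (c + 1)
        = pvTri tri (m + 1) (r + 1) (c + 1) + pvSeg tri (r + 1 + (m + 1)) (c + 1) (m + 2) :=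
      pvTri_succ tri (m + 1) (r + 1) (c + 1)
    have h3 : pvTri tri (m + 1) (r + 2) (c + 1)
        = pvTri tri m (r + 2) (c + 1) + pvSeg tri (r + 2 + m) (c + 1) (m + 1) :=
      pvTri_succ tri m (r + 2) (c + 1)
    have hrow : r + 1 + (m + 1) = r + (m + 2) := by omega
    have hrow2 : r + 2 + m = r + (m + 2) := by omega
    rw [hL, ih, h1, h2, h3, hrow, hrow2]
    -- row identity: seg c (m+3) = seg c (m+2) + seg (c+1) (m+2) − seg (c+1) (m+1)
    have hseg1 : pvSeg tri (r + (m + 2)) c (m + 3)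
        = pvSeg tri (r + (m + 2)) c (m + 2) + pvCell tri (r + (m + 2)) (c + (m + 2)) :=
      pvSeg_succ tri (r + (m + 2)) c (m + 2)
    have hseg2 : pvSeg tri (r + (m + 2)) (c + 1) (m + 2)
        = pvSeg tri (r + (m + 2)) (c + 1) (m + 1) + pvCell tri (r + (m + 2)) (c + 1 + (m + 1)) :=
      pvSeg_succ tri (r + (m + 2)) (c + 1) (m + 1)
    have hc : c + 1 + (m + 1) = c + (m + 2) := by omega
    rw [hseg1, hseg2, hc]
    ring

-- inclusion-exclusion: a height-d triangle = apex + two height-(d-1) children − height-(d-2) overlap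
lemma pvTri_ie (tri : List Int) (d r c : Nat) (hd : 1 ≤ d) :
    pvTri tri d r c = pvCell tri r c + pvTri tri (d - 1) (r + 1) c
      + pvTri tri (d - 1) (r + 1) (c + 1) - pvTri tri (d - 2) (r + 2) (c + 1) := by
  match d, hd with
  | 1, _ => simp [pvTri_one, pvTri_zero]
  | (m + 2), _ =>
    have h := pvTri_ie2 tri m r c
    simpa using h

-- "array a reads as the table of height-k sums on rows < R"
def pvReads (tri a : List Int) (k R : Nat) : Prop :=
  a.length = tri.length ∧ ∀ r c : Nat, r < R → c ≤ r →
    (pvFlat r c < tri.length → a.getD (pvFlat r c) 0 = pvTri tri k r c) ∧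
    (tri.length ≤ pvFlat r c → pvTri tri k r c = 0)

def pvWriteRow (tri : List Int) (d level k : Nat) (a : List Int) : List Int :=
  (List.range k).foldl (fun a j => a.set (pvFlat level j) (pvTri tri d level j)) a
def pvWriteLvls (tri : List Int) (d m : Nat) (a : List Int) : List Int :=
  (List.range m).foldl (fun a l => pvWriteRow tri d l (l + 1) a) a

lemma pvWriteRow_length (tri : List Int) (d level k : Nat) (a : List Int) :
    (pvWriteRow tri d level k a).length = a.length := by
  induction k with
  | zero => simp [pvWriteRow]
  | succ m ih => simp [pvWriteRow, List.range_succ, List.foldl_append] at ih ⊢; simp [ih]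
lemma pvWriteRow_getD_lo (tri : List Int) (d level k : Nat) (a : List Int) (p : Nat)
    (hp : p < pvT level ∨ pvT level + k ≤ p) :
    (pvWriteRow tri d level k a).getD p 0 = a.getD p 0 := by
  induction k with
  | zero => simp [pvWriteRow]
  | succ m ih =>
    have hne : pvFlat level m ≠ p := by unfold pvFlat; omega
    simp only [pvWriteRow, List.range_succ, List.foldl_append, List.foldl_cons, List.foldl_nil]
    rw [show ((List.range m).foldl
        (fun a j => a.set (pvFlat level j) (pvTri tri d level j)) a) = pvWriteRow tri d level m a
      from rfl]
    rw [List.getD, List.getElem?_set_ne hne, ← List.getD]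
    exact ih (by omega)
lemma pvWriteRow_getD_hit (tri : List Int) (d level k : Nat) (a : List Int) (j : Nat)
    (hj : j < k) (hlen : pvFlat level j < a.length) :
    (pvWriteRow tri d level k a).getD (pvFlat level j) 0 = pvTri tri d level j := by
  induction k with
  | zero => omega
  | succ m ih =>
    simp only [pvWriteRow, List.range_succ, List.foldl_append, List.foldl_cons, List.foldl_nil]
    rw [show ((List.range m).foldl
        (fun a j => a.set (pvFlat level j) (pvTri tri d level j)) a) = pvWriteRow tri d level m a
      from rfl]
    by_cases hjm : j = m
    · subst hjm
      have hl : pvFlat level j < (pvWriteRow tri d level j a).length := by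
        rw [pvWriteRow_length]; exact hlen
      simp [List.getD, hl]
    · have hne : pvFlat level m ≠ pvFlat level j := by unfold pvFlat; omega
      rw [List.getD, List.getElem?_set_ne hne, ← List.getD]
      exact ih (by omega)
lemma pvWriteLvls_length (tri : List Int) (d m : Nat) (a : List Int) :
    (pvWriteLvls tri d m a).length = a.length := by
  induction m with
  | zero => simp [pvWriteLvls]
  | succ l ih =>
    simp only [pvWriteLvls, List.range_succ, List.foldl_append, List.foldl_cons, List.foldl_nil]
      at ih ⊢
    rw [pvWriteRow_length, ih]
lemma pvWriteLvls_getD_hit (tri : List Int) (d m : Nat) (a : List Int) (r c : Nat)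
    (hr : r < m) (hc : c ≤ r) (hlen : pvFlat r c < a.length) :
    (pvWriteLvls tri d m a).getD (pvFlat r c) 0 = pvTri tri d r c := by
  induction m with
  | zero => omega
  | succ l ih =>
    simp only [pvWriteLvls, List.range_succ, List.foldl_append, List.foldl_cons, List.foldl_nil]
      at ih ⊢
    rw [show ∀ b, ((List.range l).foldl (fun a l => pvWriteRow tri d l (l + 1) a) b)
        = pvWriteLvls tri d l b from fun _ => rfl]
    by_cases hrl : r = l
    · subst hrl
      exact pvWriteRow_getD_hit tri d r (r + 1) _ c (by omega)
        (by rw [pvWriteLvls_length]; exact hlen)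
    · have hlo : pvFlat r c < pvT l ∨ pvT l + (l + 1) ≤ pvFlat r c := by
        left
        calc pvFlat r c < pvT (r + 1) := pvFlat_lt_pvT hc
        _ ≤ pvT l := pvT_mono (by omega)
      rw [pvWriteRow_getD_lo tri d l (l + 1) _ _ hlo]
      exact ih (by omega)


lemma pvAStep_eq (tri sum1 sum2 : List Int) (depth d level index : Nat)
    (h1 : pvReads tri sum1 (d - 1) (depth - d + 2)) (h2 : pvReads tri sum2 (d - 2) (depth - d + 3))
    (hT : pvT depth ≤ tri.length) (hd : 1 ≤ d) (hdd : d ≤ depth) (hlev : level ≤ depth - d)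
    (hidx : index ≤ level) (a : List Int) (mS : Int) (mI : Option (Int × Int × Int × Int)) :
    pvAStep tri sum1 sum2 d level
      (a, pvFlat level index, pvFlat (level + 1) index, pvFlat (level + 1) (index + 1),
        pvFlat (level + 2) (index + 1), mS, mI) index
    = (a.set (pvFlat level index) (pvTri tri d level index),
        pvFlat level (index + 1), pvFlat (level + 1) (index + 1), pvFlat (level + 1) (index + 2),
        pvFlat (level + 2) (index + 2),
        (pvCand tri d level index (mS, mI)).1, (pvCand tri d level index (mS, mI)).2) := by
  obtain ⟨hlen1, hread1⟩ := h1
  obtain ⟨hlen2, hread2⟩ := h2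
  have e1 : pvFlat level (index + 1) = pvFlat level index + 1 := by unfold pvFlat; omega
  have e2 : pvFlat (level + 1) (index + 2) = pvFlat (level + 1) (index + 1) + 1 := by
    unfold pvFlat; omega
  have e3 : pvFlat (level + 2) (index + 2) = pvFlat (level + 2) (index + 1) + 1 := by
    unfold pvFlat; omega
  have e4 : pvFlat (level + 1) (index + 1) = pvFlat (level + 1) index + 1 := by
    unfold pvFlat; omega
  -- the computed value is the height-d sub-triangle sum at (level, index)
  have hval : (match sum1[pvFlat (level + 1) index]?, sum1[pvFlat (level + 1) (index + 1)]? with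
      | some av, some bv =>
        match sum2[pvFlat (level + 2) (index + 1)]? with
        | some g => tri.getD (pvFlat level index) 0 + av + bv - g
        | none => tri.getD (pvFlat level index) 0 + av + bv
      | _, _ => tri.getD (pvFlat level index) 0) = pvTri tri d level index := by
    by_cases hc2 : pvFlat (level + 1) (index + 1) < tri.length
    · have hc1 : pvFlat (level + 1) index < tri.length := by
        unfold pvFlat at hc2 ⊢; omega
      have hv1 : sum1[pvFlat (level + 1) index]?
          = some (sum1.getD (pvFlat (level + 1) index) 0) := by
        rw [List.getD_eq_getElem?_getD, List.getElem?_eq_getElem (by omega)]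
        rfl
      have hv2 : sum1[pvFlat (level + 1) (index + 1)]?
          = some (sum1.getD (pvFlat (level + 1) (index + 1)) 0) := by
        rw [List.getD_eq_getElem?_getD, List.getElem?_eq_getElem (by omega)]
        rfl
      have ht1 : sum1.getD (pvFlat (level + 1) index) 0 = pvTri tri (d - 1) (level + 1) index :=
        (hread1 (level + 1) index (by omega) (by omega)).1 hc1
      have ht2 : sum1.getD (pvFlat (level + 1) (index + 1)) 0
          = pvTri tri (d - 1) (level + 1) (index + 1) :=
        (hread1 (level + 1) (index + 1) (by omega) (by omega)).1 hc2
      rw [hv1, hv2, ht1, ht2]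
      rcases hG : sum2[pvFlat (level + 2) (index + 1)]? with _ | g
      · have hge : tri.length ≤ pvFlat (level + 2) (index + 1) := by
          have := List.getElem?_eq_none_iff.mp hG
          omega
        have h0 : pvTri tri (d - 2) (level + 2) (index + 1) = 0 :=
          (hread2 (level + 2) (index + 1) (by omega) (by omega)).2 hge
        rw [pvTri_ie tri d level index hd, h0]
        show pvCell tri level index + _ + _ = _
        ring
      · have hlt : pvFlat (level + 2) (index + 1) < sum2.length :=
          (List.getElem?_eq_some_iff.mp hG).1
        have hgv : g = sum2.getD (pvFlat (level + 2) (index + 1)) 0 := by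
          rw [List.getD_eq_getElem?_getD, hG]; rfl
        have ht0 : sum2.getD (pvFlat (level + 2) (index + 1)) 0
            = pvTri tri (d - 2) (level + 2) (index + 1) :=
          (hread2 (level + 2) (index + 1) (by omega) (by omega)).1 (by omega)
        rw [hgv, ht0, pvTri_ie tri d level index hd]
        show pvCell tri level index + _ + _ - _ = _
        ring
    · -- only reachable when d = 1 (for d ≥ 2 the children are inside the triangle)
      have hd1 : d = 1 := by
        by_contra hne
        have hd2 : 2 ≤ d := by omega
        have : pvFlat (level + 1) (index + 1) < pvT (level + 2) := pvFlat_lt_pvT (by omega)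
        have : pvT (level + 2) ≤ pvT depth := pvT_mono (by omega)
        omega
      subst hd1
      have hnone : sum1[pvFlat (level + 1) (index + 1)]? = none :=
        List.getElem?_eq_none_iff.mpr (by omega)
      rcases hv1 : sum1[pvFlat (level + 1) index]? with _ | av <;>
        simp [hnone, pvTri_one, pvCell]
  rw [e4] at hval
  simp only [pvAStep, pvCand, e1, e2, e3, e4, hval]
  split_ifs <;> rfl

lemma pvARow_eq (tri sum1 sum2 : List Int) (depth d level : Nat)
    (h1 : pvReads tri sum1 (d - 1) (depth - d + 2)) (h2 : pvReads tri sum2 (d - 2) (depth - d + 3))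
    (hT : pvT depth ≤ tri.length) (hd : 1 ≤ d) (hdd : d ≤ depth) (hlev : level ≤ depth - d)
    (k : Nat) (hk : k ≤ level + 1) (a : List Int) (mS : Int)
    (mI : Option (Int × Int × Int × Int)) :
    (List.range k).foldl (pvAStep tri sum1 sum2 d level)
      (a, pvFlat level 0, pvFlat (level + 1) 0, pvFlat (level + 1) 1, pvFlat (level + 2) 1, mS, mI)
    = (pvWriteRow tri d level k a, pvFlat level k, pvFlat (level + 1) k, pvFlat (level + 1) (k + 1),
        pvFlat (level + 2) (k + 1),
        (pvCanonRow tri d level k (mS, mI)).1, (pvCanonRow tri d level k (mS, mI)).2) := by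
  induction k with
  | zero => simp [pvWriteRow, pvCanonRow]
  | succ m ih =>
    rw [List.range_succ, List.foldl_append, ih (by omega), List.foldl_cons, List.foldl_nil]
    rw [pvAStep_eq tri sum1 sum2 depth d level m h1 h2 hT hd hdd hlev (by omega)]
    have hw : pvWriteRow tri d level (m + 1) a
        = (pvWriteRow tri d level m a).set (pvFlat level m) (pvTri tri d level m) := by
      simp [pvWriteRow, List.range_succ]
    have hcr : pvCanonRow tri d level (m + 1) (mS, mI)
        = pvCand tri d level m (pvCanonRow tri d level m (mS, mI)) := by
      simp [pvCanonRow, List.range_succ]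
    rw [hw, hcr]

lemma pvALevels_eq (tri sum1 sum2 : List Int) (depth d : Nat)
    (h1 : pvReads tri sum1 (d - 1) (depth - d + 2)) (h2 : pvReads tri sum2 (d - 2) (depth - d + 3))
    (hT : pvT depth ≤ tri.length) (hd : 1 ≤ d) (hdd : d ≤ depth)
    (m : Nat) (hm : m ≤ depth - d + 1) (a : List Int) (mS : Int)
    (mI : Option (Int × Int × Int × Int)) :
    (List.range m).foldl (pvALvl tri sum1 sum2 d) (a, 0, 1, 2, 4, mS, mI)
    = (pvWriteLvls tri d m a, pvFlat m 0, pvFlat (m + 1) 0, pvFlat (m + 1) 1, pvFlat (m + 2) 1,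
        (pvCanonLvls tri d m (mS, mI)).1, (pvCanonLvls tri d m (mS, mI)).2) := by
  induction m with
  | zero =>
    have h0 : pvFlat 0 0 = 0 ∧ pvFlat 1 0 = 1 ∧ pvFlat 1 1 = 2 ∧ pvFlat 2 1 = 4 := by
      refine ⟨rfl, ?_, ?_, ?_⟩ <;> simp [pvFlat, pvT]
    simp [pvWriteLvls, pvCanonLvls, h0.1, h0.2.1, h0.2.2.1, h0.2.2.2]
  | succ l ih =>
    rw [List.range_succ, List.foldl_append, ih (by omega), List.foldl_cons, List.foldl_nil]
    show pvALvl tri sum1 sum2 d _ l = _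
    unfold pvALvl
    rw [pvARow_eq tri sum1 sum2 depth d l h1 h2 hT hd hdd (by omega) (l + 1) (le_refl _)]
    have a1 := pvT_succ l
    have a2 : pvT (l + 2) = pvT (l + 1) + (l + 2) := pvT_succ (l + 1)
    have a3 : pvT (l + 3) = pvT (l + 2) + (l + 3) := pvT_succ (l + 2)
    have e1 : pvFlat l (l + 1) = pvFlat (l + 1) 0 := by unfold pvFlat; omega
    have e2 : pvFlat (l + 1) (l + 1) + 1 = pvFlat (l + 2) 0 := by unfold pvFlat; omega
    have e3 : pvFlat (l + 1) (l + 2) + 1 = pvFlat (l + 2) 1 := by unfold pvFlat; omega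
    have e4 : pvFlat (l + 2) (l + 2) + 2 = pvFlat (l + 3) 1 := by unfold pvFlat; omega
    have hw : pvWriteLvls tri d (l + 1) a = pvWriteRow tri d l (l + 1) (pvWriteLvls tri d l a) := by
      simp [pvWriteLvls, List.range_succ]
    have hcl : pvCanonLvls tri d (l + 1) (mS, mI)
        = pvCanonRow tri d l (l + 1) (pvCanonLvls tri d l (mS, mI)) := by
      simp [pvCanonLvls, List.range_succ]
    simp only [e1, e2, e3, e4, hw, hcl]
lemma pvReads_replicate (tri : List Int) (R : Nat) :
    pvReads tri (List.replicate tri.length (0 : Int)) 0 R := by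
  refine ⟨by simp, fun r c _ _ => ⟨fun h => ?_, fun _ => pvTri_zero tri r c⟩⟩
  rw [pvTri_zero]
  rw [List.getD_eq_getElem?_getD, List.getElem?_replicate]
  simp [h]

lemma pvAOuter (tri : List Int) (depth : Nat) (hT : pvT depth ≤ tri.length)
    (mS0 : Int) (dm : Nat) (hdm : dm ≤ depth) :
    ∃ s0 s1 s2 : List Int,
      (List.range dm).foldl (pvAIter tri depth)
        (List.replicate tri.length 0, List.replicate tri.length 0, List.replicate tri.length 0,
          mS0, none)
      = (s0, s1, s2, (pvCanon tri depth dm (mS0, none)).1, (pvCanon tri depth dm (mS0, none)).2)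
      ∧ s0.length = tri.length
      ∧ pvReads tri s1 dm (depth - dm + 1)
      ∧ pvReads tri s2 (dm - 1) (depth - dm + 2) := by
  induction dm with
  | zero =>
    exact ⟨List.replicate tri.length 0, List.replicate tri.length 0, List.replicate tri.length 0,
      by simp [pvCanon], by simp, pvReads_replicate tri _, pvReads_replicate tri _⟩
  | succ dmp ih =>
    obtain ⟨s0, s1, s2, hEq, hl0, hr1, hr2⟩ := ih (by omega)
    have h1 : pvReads tri s1 ((dmp + 1) - 1) (depth - (dmp + 1) + 2) := by
      rw [show (dmp + 1) - 1 = dmp from rfl, show depth - (dmp + 1) + 2 = depth - dmp + 1 by omega]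
      exact hr1
    have h2 : pvReads tri s2 ((dmp + 1) - 2) (depth - (dmp + 1) + 3) := by
      rw [show (dmp + 1) - 2 = dmp - 1 by omega,
        show depth - (dmp + 1) + 3 = depth - dmp + 2 by omega]
      exact hr2
    have hstep : pvAIter tri depth
        (s0, s1, s2, (pvCanon tri depth dmp (mS0, none)).1, (pvCanon tri depth dmp (mS0, none)).2)
        dmp
        = (s2, pvWriteLvls tri (dmp + 1) (depth - (dmp + 1) + 1) s0, s1,
            (pvCanonLvls tri (dmp + 1) (depth - (dmp + 1) + 1)
              (pvCanon tri depth dmp (mS0, none))).1,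
            (pvCanonLvls tri (dmp + 1) (depth - (dmp + 1) + 1)
              (pvCanon tri depth dmp (mS0, none))).2) := by
      unfold pvAIter
      simp only
      rw [pvALevels_eq tri s1 s2 depth (dmp + 1) h1 h2 hT (by omega) (by omega)
        (depth - (dmp + 1) + 1) (le_refl _) s0 _ _]
    rw [List.range_succ, List.foldl_append, hEq, List.foldl_cons, List.foldl_nil, hstep]
    have hc : pvCanon tri depth (dmp + 1) (mS0, none)
        = pvCanonLvls tri (dmp + 1) (depth - (dmp + 1) + 1)
            (pvCanon tri depth dmp (mS0, none)) := by
      simp [pvCanon, List.range_succ]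
    refine ⟨s2, _, s1, by rw [hc], hr2.1, ?_, h1⟩
    -- the freshly written sum0 reads as the height-(dmp+1) table
    constructor
    · rw [pvWriteLvls_length, hl0]
    · intro r c hrR hc2
      have hflat : pvFlat r c < tri.length := by
        have hx : pvFlat r c < pvT (r + 1) := pvFlat_lt_pvT hc2
        have hy : pvT (r + 1) ≤ pvT depth := pvT_mono (by omega)
        omega
      refine ⟨fun _ => ?_, fun h => by omega⟩
      exact pvWriteLvls_getD_hit tri (dmp + 1) _ s0 r c (by omega) hc2 (by omega)
lemma pvA_eq_canon (tri : List Int) :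
    min_sub_triangle tri
    = (pvCanon tri ((pvISqrt (8 * tri.length + 1) - 1) / 2)
        ((pvISqrt (8 * tri.length + 1) - 1) / 2) (tri.getD 0 0, none)).2 := by
  obtain ⟨s0, s1, s2, hEq, -, -, -⟩ := pvAOuter tri ((pvISqrt (8 * tri.length + 1) - 1) / 2)
    (pvDepth_le tri.length) (tri.getD 0 0) ((pvISqrt (8 * tri.length + 1) - 1) / 2) (le_refl _)
  unfold min_sub_triangle
  simp only
  rw [hEq]
-- ---- B side ----
def pvPrefixRow (tri : List Int) (r : Nat) : List Int :=
  (List.range (r + 2)).map (fun j => pvSeg tri r 0 j)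

lemma pvBBuild_fold (xs : List Int) : ∀ (q : List Int) (s : Int),
    xs.foldl pvBBuildRow (q, s)
    = (q ++ (List.range xs.length).map (fun j => s + (xs.take (j + 1)).sum), s + xs.sum) := by
  induction xs with
  | nil => intro q s; simp
  | cons v tl ih =>
    intro q s
    rw [List.foldl_cons]
    show tl.foldl pvBBuildRow (q ++ [s + v], s + v) = _
    rw [ih]
    refine Prod.ext ?_ (by simp; ring)
    simp only [List.length_cons, List.range_succ_eq_map, List.map_cons, List.map_map,
      List.append_assoc, List.singleton_append]
    congr 1
    · simp
      intro a ha
      ring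

-- the slice that Source B takes for row r is exactly the row of cells
lemma pvSlice_row (tri : List Int) (r : Nat) (hr : pvT (r + 1) ≤ tri.length) :
    (tri.drop (pvT r)).take (r + 1) = (List.range (r + 1)).map (fun c => pvCell tri r c) := by
  have hTr : pvT r + (r + 1) = pvT (r + 1) := (pvT_succ r).symm
  apply List.ext_getElem
  · simp
    omega
  · intro i h1 h2
    have hi : i < r + 1 := by simp at h1; omega
    have hlt : pvT r + i < tri.length := by omega
    simp [List.getElem_take, List.getElem_drop, pvCell, pvFlat]
    rw [List.getElem?_eq_getElem hlt]
    rfl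

lemma pvPrefixRow_cons (tri : List Int) (r : Nat) :
    pvPrefixRow tri r = 0 :: (List.range (r + 1)).map (fun j => pvSeg tri r 0 (j + 1)) := by
  unfold pvPrefixRow
  rw [show r + 2 = (r + 1) + 1 from rfl, List.range_succ_eq_map]
  simp [pvSeg_zero, List.map_map, Function.comp_def]

lemma pvBPre_aux (tri : List Int) (depth : Nat) (hT : pvT depth ≤ tri.length) (m : Nat)
    (hm : m ≤ depth) :
    (List.range m).foldl (pvBBuildPre tri) ([], 0)
    = ((List.range m).map (pvPrefixRow tri), pvT m) := by
  induction m with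
  | zero => simp [pvT]
  | succ l ih =>
    rw [List.range_succ, List.foldl_append, ih (by omega), List.foldl_cons, List.foldl_nil]
    unfold pvBBuildPre
    simp only
    have hrl : pvT (l + 1) ≤ tri.length := le_trans (pvT_mono hm) hT
    rw [pvSlice_row tri l hrl, pvBBuild_fold]
    refine Prod.ext ?_ (by simp [pvT_succ])
    simp only [List.map_append, List.map_cons, List.map_nil, List.length_map, List.length_range]
    congr 1
    rw [pvPrefixRow_cons]
    simp only [List.singleton_append, List.cons.injEq, true_and]
    refine ⟨List.map_congr_left ?_, trivial⟩
    intro j hj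
    have hjl : j < l + 1 := List.mem_range.mp hj
    rw [← List.map_take, List.take_range]
    have hmin : min (j + 1) (l + 1) = j + 1 := by omega
    rw [hmin]
    simp [pvSeg]
def pvRowFold (v : Nat → Int) (k : Nat) (row : List Int) : List Int :=
  (List.range k).foldl (fun row j => row.set j (v j)) row

lemma pvRowFold_length (v : Nat → Int) (k : Nat) (row : List Int) :
    (pvRowFold v k row).length = row.length := by
  induction k with
  | zero => simp [pvRowFold]
  | succ m ih => simp [pvRowFold, List.range_succ, List.foldl_append] at ih ⊢; simp [ih]

lemma pvRowFold_getD_hi (v : Nat → Int) (k : Nat) (row : List Int) (p : Nat) (hk : k ≤ p) :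
    (pvRowFold v k row).getD p 0 = row.getD p 0 := by
  induction k with
  | zero => simp [pvRowFold]
  | succ m ih =>
    simp only [pvRowFold, List.range_succ, List.foldl_append, List.foldl_cons, List.foldl_nil]
    rw [show ((List.range m).foldl (fun row j => row.set j (v j)) row) = pvRowFold v m row
      from rfl]
    rw [List.getD_eq_getElem?_getD, List.getElem?_set_ne (by omega), ← List.getD_eq_getElem?_getD]
    exact ih (by omega)

lemma pvRowFold_getD_hit (v : Nat → Int) (k : Nat) (row : List Int) (j : Nat)
    (hj : j < k) (hlen : j < row.length) :
    (pvRowFold v k row).getD j 0 = v j := by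
  induction k with
  | zero => omega
  | succ m ih =>
    simp only [pvRowFold, List.range_succ, List.foldl_append, List.foldl_cons, List.foldl_nil]
    rw [show ((List.range m).foldl (fun row j => row.set j (v j)) row) = pvRowFold v m row
      from rfl]
    by_cases hjm : j = m
    · subst hjm
      have hl : j < (pvRowFold v j row).length := by rw [pvRowFold_length]; exact hlen
      simp [List.getD_eq_getElem?_getD, hl]
    · rw [List.getD_eq_getElem?_getD, List.getElem?_set_ne (by omega),
        ← List.getD_eq_getElem?_getD]
      exact ih (by omega)

lemma pvGetD_set_self (a : List (List Int)) (i : Nat) (x : List Int) (h : i < a.length) :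
    (a.set i x).getD i [] = x := by
  simp [List.getD_eq_getElem?_getD, h]

lemma pvGetD_set_ne (a : List (List Int)) (i j : Nat) (x : List Int) (h : i ≠ j) :
    (a.set i x).getD j [] = a.getD j [] := by
  rw [List.getD_eq_getElem?_getD, List.getElem?_set_ne h, ← List.getD_eq_getElem?_getD]

lemma pvPrefixRow_getD (tri : List Int) (r j : Nat) (hj : j < r + 2) :
    (pvPrefixRow tri r).getD j 0 = pvSeg tri r 0 j := by
  unfold pvPrefixRow
  rw [List.getD_eq_getElem?_getD, List.getElem?_map, List.getElem?_range hj]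
  rfl

lemma pvPre_row (tri : List Int) (depth r : Nat) (hr : r < depth) :
    ((List.range depth).map (pvPrefixRow tri)).getD r [] = pvPrefixRow tri r := by
  rw [List.getD_eq_getElem?_getD, List.getElem?_map, List.getElem?_range hr]
  rfl

lemma pvBRow_eq (tri : List Int) (pre : List (List Int)) (depth d level : Nat)
    (hpre : pre = (List.range depth).map (pvPrefixRow tri))
    (hd : 1 ≤ d) (hdd : d ≤ depth) (hlev : level ≤ depth - d)
    (acc0 : List (List Int)) (hlen : acc0.length = depth)
    (hread : ∀ c, c ≤ level → (acc0.getD level []).getD c 0 = pvTri tri (d - 1) level c)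
    (k : Nat) (hk : k ≤ level + 1) (mS : Int) (mI : Option (Int × Int × Int × Int)) :
    (List.range k).foldl (pvBStep (pre.getD (level + d - 1) []) d level) (acc0, mS, mI)
    = (acc0.set level (pvRowFold (fun j => pvTri tri d level j) k (acc0.getD level [])),
        (pvCanonRow tri d level k (mS, mI)).1, (pvCanonRow tri d level k (mS, mI)).2) := by
  obtain ⟨e, rfl⟩ : ∃ e, d = e + 1 := ⟨d - 1, by omega⟩
  have hrow : pre.getD (level + (e + 1) - 1) [] = pvPrefixRow tri (level + e) := by
    rw [hpre, show level + (e + 1) - 1 = level + e by omega]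
    exact pvPre_row tri depth (level + e) (by omega)
  induction k with
  | zero =>
    simp only [List.range_zero, List.foldl_nil, pvRowFold, pvCanonRow]
    have : acc0.set level (acc0.getD level []) = acc0 := by
      rw [List.getD_eq_getElem?_getD, List.getElem?_eq_getElem (by omega : level < acc0.length)]
      simp
    rw [this]
  | succ m ih =>
    rw [List.range_succ, List.foldl_append, ih (by omega), List.foldl_cons, List.foldl_nil]
    have hmlev : m ≤ level := by omega
    -- one step at index m
    show pvBStep (pre.getD (level + (e + 1) - 1) []) (e + 1) level _ m = _
    unfold pvBStep
    simp only
    have hacc : (acc0.set level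
          (pvRowFold (fun j => pvTri tri (e + 1) level j) m (acc0.getD level []))).getD level []
        = pvRowFold (fun j => pvTri tri (e + 1) level j) m (acc0.getD level []) :=
      pvGetD_set_self _ _ _ (by omega)
    have hv0 : (pvRowFold (fun j => pvTri tri (e + 1) level j) m (acc0.getD level [])).getD m 0
        = pvTri tri e level m := by
      rw [pvRowFold_getD_hi _ _ _ _ (le_refl m)]
      have := hread m hmlev
      simpa using this
    have hv1 : (pre.getD (level + (e + 1) - 1) []).getD (m + (e + 1)) 0
        = pvSeg tri (level + e) 0 (m + (e + 1)) := by
      rw [hrow]; exact pvPrefixRow_getD tri (level + e) _ (by omega)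
    have hv2 : (pre.getD (level + (e + 1) - 1) []).getD m 0 = pvSeg tri (level + e) 0 m := by
      rw [hrow]; exact pvPrefixRow_getD tri (level + e) _ (by omega)
    have hs : pvTri tri e level m + pvSeg tri (level + e) m (e + 1) = pvTri tri (e + 1) level m :=
      (pvTri_succ tri e level m).symm
    have hsplit : pvSeg tri (level + e) 0 (m + (e + 1))
        = pvSeg tri (level + e) 0 m + pvSeg tri (level + e) m (e + 1) :=
      pvSeg_split tri (level + e) m (e + 1)
    rw [hacc, hv0, hv1, hv2, hsplit]
    have hval : pvTri tri e level m + (pvSeg tri (level + e) 0 m + pvSeg tri (level + e) m (e + 1))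
        - pvSeg tri (level + e) 0 m = pvTri tri (e + 1) level m := by
      rw [← hs]; ring
    rw [hval]
    have hsetset : (acc0.set level
          (pvRowFold (fun j => pvTri tri (e + 1) level j) m (acc0.getD level []))).set level
          ((pvRowFold (fun j => pvTri tri (e + 1) level j) m (acc0.getD level [])).set m
            (pvTri tri (e + 1) level m))
        = acc0.set level
            (pvRowFold (fun j => pvTri tri (e + 1) level j) (m + 1) (acc0.getD level [])) := by
      rw [List.set_set]
      congr 1
      simp [pvRowFold, List.range_succ]
    rw [hsetset]
    have hcr : pvCanonRow tri (e + 1) level (m + 1) (mS, mI)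
        = pvCand tri (e + 1) level m (pvCanonRow tri (e + 1) level m (mS, mI)) := by
      simp [pvCanonRow, List.range_succ]
    rw [hcr]
    unfold pvCand
    simp only
    split_ifs <;> rfl
lemma pvBLevels_eq (tri : List Int) (pre : List (List Int)) (depth d : Nat)
    (hpre : pre = (List.range depth).map (pvPrefixRow tri))
    (hd : 1 ≤ d) (hdd : d ≤ depth) (m : Nat) (hm : m ≤ depth - d + 1)
    (acc0 : List (List Int)) (hlen : acc0.length = depth)
    (hrlen : ∀ l, l < depth → (acc0.getD l []).length = l + 1)
    (hread : ∀ l c, l < depth - d + 1 → c ≤ l → (acc0.getD l []).getD c 0 = pvTri tri (d - 1) l c)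
    (mS : Int) (mI : Option (Int × Int × Int × Int)) :
    ∃ acc1 : List (List Int),
      (List.range m).foldl (pvBLvl pre d) (acc0, mS, mI)
      = (acc1, (pvCanonLvls tri d m (mS, mI)).1, (pvCanonLvls tri d m (mS, mI)).2)
      ∧ acc1.length = depth
      ∧ (∀ l, l < depth → (acc1.getD l []).length = l + 1)
      ∧ (∀ l c : Nat, l < m → c ≤ l → (acc1.getD l []).getD c 0 = pvTri tri d l c)
      ∧ (∀ l, m ≤ l → acc1.getD l [] = acc0.getD l []) := by
  induction m with
  | zero =>
    exact ⟨acc0, by simp [pvCanonLvls], hlen, hrlen, fun l c h _ => by omega, fun _ _ => rfl⟩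
  | succ lv ih =>
    obtain ⟨acc1, hEq, hl1, hrl1, hv1, hu1⟩ := ih (by omega)
    rw [List.range_succ, List.foldl_append, hEq, List.foldl_cons, List.foldl_nil]
    have hsame : acc1.getD lv [] = acc0.getD lv [] := hu1 lv (le_refl _)
    have hreadlv : ∀ c, c ≤ lv → (acc1.getD lv []).getD c 0 = pvTri tri (d - 1) lv c := by
      intro c hc
      rw [hsame]
      exact hread lv c (by omega) hc
    have hlvl : pvBLvl pre d
        (acc1, (pvCanonLvls tri d lv (mS, mI)).1, (pvCanonLvls tri d lv (mS, mI)).2) lv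
        = (acc1.set lv (pvRowFold (fun j => pvTri tri d lv j) (lv + 1) (acc1.getD lv [])),
            (pvCanonRow tri d lv (lv + 1) (pvCanonLvls tri d lv (mS, mI))).1,
            (pvCanonRow tri d lv (lv + 1) (pvCanonLvls tri d lv (mS, mI))).2) := by
      unfold pvBLvl
      simp only
      rw [pvBRow_eq tri pre depth d lv hpre hd hdd (by omega) acc1 hl1 hreadlv (lv + 1)
        (le_refl _)]
    rw [hlvl]
    have hcl : pvCanonLvls tri d (lv + 1) (mS, mI)
        = pvCanonRow tri d lv (lv + 1) (pvCanonLvls tri d lv (mS, mI)) := by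
      simp [pvCanonLvls, List.range_succ]
    refine ⟨_, by rw [hcl], by simp [hl1], ?_, ?_, ?_⟩
    · intro l hl
      by_cases hllv : l = lv
      · subst hllv
        rw [pvGetD_set_self _ _ _ (by omega), pvRowFold_length, hsame]
        exact hrlen l hl
      · rw [pvGetD_set_ne _ _ _ _ (fun h => hllv h.symm)]
        exact hrl1 l hl
    · intro l c hl hc
      by_cases hllv : l = lv
      · subst hllv
        rw [pvGetD_set_self _ _ _ (by omega), pvRowFold_getD_hit _ _ _ _ (by omega)]
        rw [hsame, hrlen l (by omega)]
        omega
      · rw [pvGetD_set_ne _ _ _ _ (fun h => hllv h.symm)]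
        exact hv1 l c (by omega) hc
    · intro l hl
      rw [pvGetD_set_ne _ _ _ _ (by omega)]
      exact hu1 l (by omega)

lemma pvAccInit_row (depth l : Nat) (hl : l < depth) :
    ((List.range depth).map (fun r => List.replicate (r + 1) (0 : Int))).getD l []
    = List.replicate (l + 1) 0 := by
  rw [List.getD_eq_getElem?_getD, List.getElem?_map, List.getElem?_range hl]
  rfl

lemma pvBOuter (tri : List Int) (pre : List (List Int)) (depth : Nat)
    (hpre : pre = (List.range depth).map (pvPrefixRow tri))
    (mS0 : Int) (dm : Nat) (hdm : dm ≤ depth) :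
    ∃ acc : List (List Int),
      (List.range dm).foldl (pvBIter pre depth)
        ((List.range depth).map (fun r => List.replicate (r + 1) (0 : Int)), mS0, none)
      = (acc, (pvCanon tri depth dm (mS0, none)).1, (pvCanon tri depth dm (mS0, none)).2)
      ∧ acc.length = depth
      ∧ (∀ l, l < depth → (acc.getD l []).length = l + 1)
      ∧ (∀ l c : Nat, l < depth - dm → c ≤ l → (acc.getD l []).getD c 0 = pvTri tri dm l c) := by
  induction dm with
  | zero =>
    refine ⟨(List.range depth).map (fun r => List.replicate (r + 1) (0 : Int)),
      by simp [pvCanon], by simp, ?_, ?_⟩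
    · intro l hl
      rw [pvAccInit_row depth l hl]
      simp
    · intro l c hl hc
      rw [pvAccInit_row depth l (by omega), pvTri_zero]
      simp [List.getD_eq_getElem?_getD, hc]
  | succ dmp ih =>
    obtain ⟨acc, hEq, hl, hrl, hv⟩ := ih (by omega)
    rw [List.range_succ, List.foldl_append, hEq, List.foldl_cons, List.foldl_nil]
    have hread : ∀ l c, l < depth - (dmp + 1) + 1 → c ≤ l →
        (acc.getD l []).getD c 0 = pvTri tri ((dmp + 1) - 1) l c := by
      intro l c h1 h2
      exact hv l c (by omega) h2
    obtain ⟨acc1, hEq1, hl1, hrl1, hv1, hu1⟩ := pvBLevels_eq tri pre depth (dmp + 1) hpre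
      (by omega) (by omega) (depth - (dmp + 1) + 1) (le_refl _) acc hl hrl hread
      (pvCanon tri depth dmp (mS0, none)).1 (pvCanon tri depth dmp (mS0, none)).2
    have hit : pvBIter pre depth
        (acc, (pvCanon tri depth dmp (mS0, none)).1, (pvCanon tri depth dmp (mS0, none)).2) dmp
        = (acc1,
            (pvCanonLvls tri (dmp + 1) (depth - (dmp + 1) + 1)
              (pvCanon tri depth dmp (mS0, none))).1,
            (pvCanonLvls tri (dmp + 1) (depth - (dmp + 1) + 1)
              (pvCanon tri depth dmp (mS0, none))).2) := by
      unfold pvBIter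
      simp only
      rw [hEq1]
    rw [hit]
    have hc : pvCanon tri depth (dmp + 1) (mS0, none)
        = pvCanonLvls tri (dmp + 1) (depth - (dmp + 1) + 1)
            (pvCanon tri depth dmp (mS0, none)) := by
      simp [pvCanon, List.range_succ]
    refine ⟨acc1, by rw [hc], hl1, hrl1, ?_⟩
    intro l c h1 h2
    exact hv1 l c (by omega) h2

lemma pvB_eq_canon (tri : List Int) :
    min_sub_triangle_alt tri
    = (pvCanon tri ((pvISqrt (8 * tri.length + 1) - 1) / 2)
        ((pvISqrt (8 * tri.length + 1) - 1) / 2) (tri.getD 0 0, none)).2 := by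
  have hpre : ((List.range ((pvISqrt (8 * tri.length + 1) - 1) / 2)).foldl (pvBBuildPre tri)
        ([], 0)).1
      = (List.range ((pvISqrt (8 * tri.length + 1) - 1) / 2)).map (pvPrefixRow tri) := by
    rw [pvBPre_aux tri ((pvISqrt (8 * tri.length + 1) - 1) / 2) (pvDepth_le tri.length) _
      (le_refl _)]
  obtain ⟨acc, hEq, -, -, -⟩ := pvBOuter tri _ ((pvISqrt (8 * tri.length + 1) - 1) / 2)
    hpre (tri.getD 0 0) ((pvISqrt (8 * tri.length + 1) - 1) / 2) (le_refl _)
  unfold min_sub_triangle_alt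
  simp only
  rw [hpre] at hEq ⊢
  rw [hEq]

-- ===== VERDICT (by name: the statement is the Claim_ definition above) =====
theorem min_sub_triangle_spec : Claim_equal_min_sub_triangle := by
  intro triangle _ _
  unfold Spec_min_sub_triangle
  rw [pvA_eq_canon, pvB_eq_canon]
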